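-- pv_equiv track=rewrite | github.com/PerryG/PerryG.github.io | hats.py | templateScores
-- ===== SOURCE A (Python) =====
-- def templateScores(hats, template):
--     assert(len(hats) == len(template))
--     scores = [0 for h in hats]
--     for i, h in enumerate(hats):
--         if h:
--             for j, p in enumerate(template):
--                 scores[(i + j) % len(template)] += p
--     return scores
-- ===== SOURCE B (Python) =====
-- def templateScores(hats, template):
--     assert(len(hats) == len(template))
--     n = len(template)
--     scores = [0] * n
--     for i, h in enumerate(hats):
--         if h:
--             rot = template[n - i:] + template[:n - i]
--             scores = [s + r for s, r in zip(scores, rot)]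
--     return scores
-- ===== Notes on version B (the rewrite author's own statement) =====
-- stated objective: alternative
-- what changed: Replaced A's index-arithmetic scatter (nested loops writing scores[(i+j) % n] += p in place) by a slice-and-zip accumulation: for each truthy hat build the rotated template as the list concatenation template[n-i:] + template[:n-i] and replace scores by the elementwise zip-sum, so B performs no modular arithmetic and no indexed read-modify-writes at all.
import Mathlib
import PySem

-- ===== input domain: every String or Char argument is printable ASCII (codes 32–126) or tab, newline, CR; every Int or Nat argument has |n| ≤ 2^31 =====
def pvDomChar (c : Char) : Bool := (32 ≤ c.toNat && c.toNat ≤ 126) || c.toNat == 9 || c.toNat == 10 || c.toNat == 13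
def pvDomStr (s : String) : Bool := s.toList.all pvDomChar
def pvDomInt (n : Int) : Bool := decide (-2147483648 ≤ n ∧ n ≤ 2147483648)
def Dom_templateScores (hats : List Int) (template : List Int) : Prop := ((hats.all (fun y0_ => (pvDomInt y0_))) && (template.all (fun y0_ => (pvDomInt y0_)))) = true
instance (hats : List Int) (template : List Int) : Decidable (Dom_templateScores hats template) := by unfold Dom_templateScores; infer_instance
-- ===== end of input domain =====

-- B replaces A's mod-indexed in-place scatter by slicing each rotated template copy and
-- accumulating the copies elementwise with zip: alternative decomposition, same cost.

-- ===== PORT A =====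
-- scores[(i+j) % len(template)] += p  — the index (i+j) % n is in [0,n) whenever the
-- inner loop runs (n > 0 there), so List.set/getD at the toNat index is exact.
def innerStep (n : Nat) (i : Int) (s : List Int) (jp : Int × Int) : List Int :=
  let m := (PySem.Int.mod (i + jp.1) (n : Int)).toNat
  s.set m (s.getD m 0 + jp.2)

def outerStep (template : List Int) (s : List Int) (ih : Int × Int) : List Int :=
  if ih.2 ≠ 0 then (PySem.List.enumerate template 0).foldl (innerStep template.length ih.1) s else s

def templateScores (hats : List Int) (template : List Int) : List Int :=
  (PySem.List.enumerate hats 0).foldl (outerStep template) (hats.map (fun _ => (0 : Int)))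

-- ===== PORT B =====
-- rot = template[n - i:] + template[:n - i]
def rotR (template : List Int) (i : Int) : List Int :=
  PySem.List.slice template (some ((template.length : Int) - i)) none ++
  PySem.List.slice template none (some ((template.length : Int) - i))

-- scores = [s + r for s, r in zip(scores, rot)]
def altStep (template : List Int) (s : List Int) (ih : Int × Int) : List Int :=
  if ih.2 ≠ 0 then List.zipWith (· + ·) s (rotR template ih.1) else s

def templateScores_alt (hats : List Int) (template : List Int) : List Int :=
  (PySem.List.enumerate hats 0).foldl (altStep template) (List.replicate template.length (0 : Int))

-- ===== PRECONDITION & SPEC =====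
-- Pre_ excludes exactly the inputs of unequal length, on which A's assert raises AssertionError.
def Pre_templateScores (hats : List Int) (template : List Int) : Prop := hats.length = template.length
instance (hats : List Int) (template : List Int) : Decidable (Pre_templateScores hats template) := by unfold Pre_templateScores; infer_instance
def pvWitness_templateScores : List Int × List Int := ([1, 0, 2], [1, 2, 3])

def Spec_templateScores (hats : List Int) (template : List Int) (out : List Int) : Prop := out = templateScores_alt hats template
instance (hats : List Int) (template : List Int) (out : List Int) : Decidable (Spec_templateScores hats template out) := by unfold Spec_templateScores; infer_instance

-- ===== CLAIM (what is proved, stated in full; the proofs are below) =====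
def Claim_equal_templateScores : Prop := ∀ (hats : List Int) (template : List Int), Dom_templateScores hats template → Pre_templateScores hats template → Spec_templateScores hats template (templateScores hats template)

-- ===== LEMMAS AND PROOFS =====

-- the index the scatter writes for offset a equals k iff a is the unique preimage (k - i) mod n
lemma key_iff (i : Int) (a k n : Nat) (ha : a < n) (hk : k < n) :
    ((PySem.Int.mod (i + (a : Int)) (n : Int)).toNat = k) ↔ ((a : Int) = ((k : Int) - i) % (n : Int)) := by
  have hn : (0 : Int) < (n : Int) := by exact_mod_cast Nat.pos_of_ne_zero (by omega)
  rw [PySem.Int.mod_eq_emod_of_pos hn]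
  have h1 : 0 ≤ (i + (a : Int)) % (n : Int) := Int.emod_nonneg _ (ne_of_gt hn)
  have ha' : (a : Int) % (n : Int) = (a : Int) :=
    Int.emod_eq_of_lt (by exact_mod_cast Nat.zero_le a) (by exact_mod_cast ha)
  have hk' : (k : Int) % (n : Int) = (k : Int) :=
    Int.emod_eq_of_lt (by exact_mod_cast Nat.zero_le k) (by exact_mod_cast hk)
  constructor
  · intro h
    have hv : (i + (a : Int)) % (n : Int) = (k : Int) := by omega
    have h2 : ((k : Int) - i) % (n : Int) = ((i + (a : Int)) - i) % (n : Int) := by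
      conv_lhs => rw [← hv]
      rw [Int.sub_emod, Int.emod_emod_of_dvd _ dvd_rfl, ← Int.sub_emod]
    rw [h2, show (i + (a : Int)) - i = (a : Int) by ring, ha']
  · intro h
    have h2 : (i + (a : Int)) % (n : Int) = (k : Int) % (n : Int) := by
      rw [h, Int.add_emod, Int.emod_emod_of_dvd _ dvd_rfl, ← Int.add_emod,
        show i + ((k : Int) - i) = (k : Int) by ring]
    rw [h2, hk']
    omega

lemma length_innerStep (n : Nat) (i : Int) (s : List Int) (jp : Int × Int) :
    (innerStep n i s jp).length = s.length := by
  simp [innerStep]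

lemma length_foldl_innerStep (n : Nat) (i : Int) (l : List (Int × Int)) (s : List Int) :
    (l.foldl (innerStep n i) s).length = s.length := by
  induction l generalizing s with
  | nil => rfl
  | cons x t ihx => rw [List.foldl_cons, ihx, length_innerStep]

lemma inner_getD (n : Nat) (i : Int) (k j0 : Nat) (hk : k < n)
    (hj0 : (j0 : Int) = ((k : Int) - i) % (n : Int)) :
    ∀ (t' : List Int) (a : Nat) (s : List Int), s.length = n → a + t'.length ≤ n →
    ((PySem.List.enumerate t' (a : Int)).foldl (innerStep n i) s).getD k 0
      = s.getD k 0 + (if a ≤ j0 ∧ j0 < a + t'.length then t'.getD (j0 - a) 0 else 0) := by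
  intro t'
  induction t' with
  | nil =>
    intro a s hs _
    simp [PySem.List.enumerate_nil]
  | cons x t ihx =>
    intro a s hs hle
    rw [PySem.List.enumerate_cons, List.foldl_cons]
    have ha : a < n := by simp at hle; omega
    have hcast : (a : Int) + 1 = ((a + 1 : Nat) : Int) := by push_cast; ring
    rw [hcast, ihx (a + 1) _ (by rw [length_innerStep]; exact hs) (by simp at hle ⊢; omega)]
    have hkiff : ((PySem.Int.mod (i + (a : Int)) (n : Int)).toNat = k) ↔ (a = j0) := by
      rw [key_iff i a k n ha hk, ← hj0]
      exact_mod_cast Iff.rfl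
    by_cases hcase : a = j0
    · -- this step writes cell k
      have hm : (PySem.Int.mod (i + (a : Int)) (n : Int)).toNat = k := hkiff.mpr hcase
      have hset : (innerStep n i s ((a : Int), x)).getD k 0 = s.getD k 0 + x := by
        simp only [innerStep, hm]
        rw [List.getD_eq_getElem?_getD, List.getElem?_set_self (by omega), List.getD_eq_getElem?_getD]
        simp
      rw [hset]
      have c1 : ¬ (a + 1 ≤ j0 ∧ j0 < a + 1 + t.length) := by omega
      have c2 : a ≤ j0 ∧ j0 < a + (x :: t).length := by simp; omega
      rw [if_neg c1, if_pos c2]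
      subst hcase
      simp
      try omega
    · -- this step writes a different cell
      have hm : (PySem.Int.mod (i + (a : Int)) (n : Int)).toNat ≠ k := fun h => hcase (hkiff.mp h)
      have hset : (innerStep n i s ((a : Int), x)).getD k 0 = s.getD k 0 := by
        simp only [innerStep]
        rw [List.getD_eq_getElem?_getD, List.getElem?_set_ne hm, List.getD_eq_getElem?_getD]
      rw [hset]
      congr 1
      by_cases hc : a + 1 ≤ j0 ∧ j0 < a + 1 + t.length
      · have hc' : a ≤ j0 ∧ j0 < a + (x :: t).length := by simp; omega
        rw [if_pos hc, if_pos hc']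
        have : j0 - a = (j0 - (a + 1)) + 1 := by omega
        rw [this]
        simp
      · have hc' : ¬ (a ≤ j0 ∧ j0 < a + (x :: t).length) := by simp; omega
        rw [if_neg hc, if_neg hc']

lemma length_outer (template : List Int) (l : List (Int × Int)) (s : List Int) :
    (l.foldl (outerStep template) s).length = s.length := by
  induction l generalizing s with
  | nil => rfl
  | cons x t ihx =>
    rw [List.foldl_cons, ihx]
    unfold outerStep
    split
    · rw [length_foldl_innerStep]
    · rfl

lemma outer_getD (template : List Int) (k : Nat) (hk : k < template.length) :
    ∀ (l : List (Int × Int)) (s : List Int), s.length = template.length →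
    (l.foldl (outerStep template) s).getD k 0
      = s.getD k 0 + ((l.filterMap (fun ih => if ih.2 ≠ 0 then some ih.1 else none)).map
          (fun i => template.getD ((PySem.Int.mod ((k : Int) - i) (template.length : Int)).toNat) 0)).sum := by
  intro l
  induction l with
  | nil => intro s hs; simp
  | cons x t ihx =>
    intro s hs
    rw [List.foldl_cons]
    by_cases hx : x.2 ≠ 0
    · have hn : (0 : Int) < (template.length : Int) := by exact_mod_cast Nat.pos_of_ne_zero (by omega)
      have hj0lt : ((((k : Int) - x.1) % (template.length : Int))).toNat < template.length := by
        have := Int.emod_lt_of_pos ((k : Int) - x.1) hn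
        have h0 := Int.emod_nonneg ((k : Int) - x.1) (ne_of_gt hn)
        omega
      have hj0 : (((((k : Int) - x.1) % (template.length : Int))).toNat : Int)
          = (((k : Int) - x.1) % (template.length : Int)) := by
        exact Int.toNat_of_nonneg (Int.emod_nonneg _ (ne_of_gt hn))
      have hstep : outerStep template s x
          = (PySem.List.enumerate template 0).foldl (innerStep template.length x.1) s := by
        unfold outerStep; rw [if_pos hx]
      rw [hstep]
      have hlen : ((PySem.List.enumerate template 0).foldl (innerStep template.length x.1) s).length
          = template.length := by rw [length_foldl_innerStep]; exact hs
      rw [ihx _ hlen]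
      have hinner := inner_getD template.length x.1 k ((((k : Int) - x.1) % (template.length : Int))).toNat hk
        hj0 template 0 s hs (by omega)
      simp only [Nat.cast_zero, Nat.sub_zero, Nat.zero_add] at hinner
      rw [hinner, if_pos ⟨Nat.zero_le _, by omega⟩]
      have hmod : (PySem.Int.mod ((k : Int) - x.1) (template.length : Int)).toNat
          = ((((k : Int) - x.1) % (template.length : Int))).toNat := by
        rw [PySem.Int.mod_eq_emod_of_pos hn]
      rw [List.filterMap_cons, if_pos hx]
      simp only [List.map_cons, List.sum_cons, hmod]
      ring
    · have hstep : outerStep template s x = s := by unfold outerStep; rw [if_neg hx]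
      rw [hstep, ihx _ hs, List.filterMap_cons, if_neg hx]

-- B side: the rotated copy template[n-i:] + template[:n-i]

lemma rotR_eq (template : List Int) (i : Int) (h0 : 0 ≤ i) (hi : i ≤ (template.length : Int)) :
    rotR template i = template.drop ((template.length : Int) - i).toNat
      ++ template.take ((template.length : Int) - i).toNat := by
  unfold rotR
  rw [PySem.List.slice_from template (by omega), PySem.List.slice_to template (by omega)]

lemma length_rotR (template : List Int) (i : Int) (h0 : 0 ≤ i) (hi : i ≤ (template.length : Int)) :
    (rotR template i).length = template.length := by
  rw [rotR_eq template i h0 hi]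
  simp
  omega

lemma rotR_getD (template : List Int) (i : Int) (k : Nat) (h0 : 0 ≤ i)
    (hi : i < (template.length : Int)) (hk : k < template.length) :
    (rotR template i).getD k 0
      = template.getD ((PySem.Int.mod ((k : Int) - i) (template.length : Int)).toNat) 0 := by
  have hn : (0 : Int) < (template.length : Int) := by omega
  set n := template.length with hnn
  set d := ((n : Int) - i).toNat with hd
  have hdle : d ≤ n := by omega
  have hdpos : 1 ≤ d := by omega
  have hii : i.toNat = n - d := by omega
  rw [rotR_eq template i h0 (le_of_lt hi), PySem.Int.mod_eq_emod_of_pos hn]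
  by_cases hcase : k < n - d
  · -- k < i : read from the dropped part, index d + k; mod value is k - i + n = k + d
    have hmod : ((k : Int) - i) % (n : Int) = (k : Int) + (d : Int) := by
      have : ((k : Int) - i) % (n : Int) = ((k : Int) - i + n) % (n : Int) := by
        rw [Int.add_emod, Int.emod_self, add_zero, Int.emod_emod_of_dvd _ dvd_rfl]
      rw [this, Int.emod_eq_of_lt (by omega) (by omega)]
      omega
    rw [hmod]
    have htn : (((k : Int) + (d : Int)).toNat) = k + d := by omega
    rw [htn, List.getD_eq_getElem?_getD, List.getElem?_append_left (by simp; omega),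
      List.getElem?_drop, List.getD_eq_getElem?_getD]
    have hidx : ((n : Int) - i).toNat + k = k + d := by rw [← hd]; omega
    rw [hidx]
  · -- i ≤ k : read from the taken part, index k - (n - d); mod value is k - i
    have hmod : ((k : Int) - i) % (n : Int) = (k : Int) - i := by
      rw [Int.emod_eq_of_lt (by omega) (by omega)]
    rw [hmod]
    have htn : (((k : Int) - i).toNat) = k - (n - d) := by omega
    rw [htn, List.getD_eq_getElem?_getD,
      List.getElem?_append_right (by simp; omega), List.getD_eq_getElem?_getD]
    have hlen : (template.drop d).length = n - d := by simp [hnn]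
    rw [hlen, List.getElem?_take]
    rw [if_pos (by omega)]

lemma length_alt (template : List Int) (l : List (Int × Int)) (s : List Int)
    (hs : s.length = template.length)
    (hb : ∀ p ∈ l, 0 ≤ p.1 ∧ p.1 < (template.length : Int)) :
    (l.foldl (altStep template) s).length = template.length := by
  induction l generalizing s with
  | nil => simpa using hs
  | cons x t ihx =>
    rw [List.foldl_cons]
    apply ihx
    · unfold altStep
      split
      · rw [List.length_zipWith, length_rotR template x.1 (hb x (by simp)).1
          (le_of_lt (hb x (by simp)).2), hs]
        omega
      · exact hs
    · intro p hp; exact hb p (by simp [hp])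

lemma alt_getD (template : List Int) (k : Nat) (hk : k < template.length) :
    ∀ (l : List (Int × Int)) (s : List Int), s.length = template.length →
    (∀ p ∈ l, 0 ≤ p.1 ∧ p.1 < (template.length : Int)) →
    (l.foldl (altStep template) s).getD k 0
      = s.getD k 0 + ((l.filterMap (fun ih => if ih.2 ≠ 0 then some ih.1 else none)).map
          (fun i => template.getD ((PySem.Int.mod ((k : Int) - i) (template.length : Int)).toNat) 0)).sum := by
  intro l
  induction l with
  | nil => intro s hs _; simp
  | cons x t ihx =>
    intro s hs hb
    have hx1 := hb x (by simp)
    rw [List.foldl_cons]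
    by_cases hx : x.2 ≠ 0
    · have hstep : altStep template s x = List.zipWith (· + ·) s (rotR template x.1) := by
        unfold altStep; rw [if_pos hx]
      have hrlen : (rotR template x.1).length = template.length :=
        length_rotR template x.1 hx1.1 (le_of_lt hx1.2)
      have hzlen : (List.zipWith (· + ·) s (rotR template x.1)).length = template.length := by
        rw [List.length_zipWith, hs, hrlen]; omega
      rw [hstep, ihx _ hzlen (fun p hp => hb p (by simp [hp]))]
      have hzget : (List.zipWith (· + ·) s (rotR template x.1)).getD k 0
          = s.getD k 0 + (rotR template x.1).getD k 0 := by
        rw [List.getD_eq_getElem _ 0 (by omega), List.getD_eq_getElem _ 0 (by omega),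
          List.getD_eq_getElem _ 0 (by omega), List.getElem_zipWith]
      rw [hzget, rotR_getD template x.1 k hx1.1 hx1.2 hk,
        List.filterMap_cons, if_pos hx]
      simp only [List.map_cons, List.sum_cons]
      ring
    · have hstep : altStep template s x = s := by unfold altStep; rw [if_neg hx]
      rw [hstep, ihx _ hs (fun p hp => hb p (by simp [hp])), List.filterMap_cons, if_neg hx]

-- ===== VERDICT (by name: the statement is the Claim_ definition above) =====
theorem templateScores_spec : Claim_equal_templateScores := by
  intro hats template _ hpre
  unfold Spec_templateScores templateScores templateScores_alt
  have hbnd : ∀ p ∈ PySem.List.enumerate hats 0, 0 ≤ p.1 ∧ p.1 < (template.length : Int) := by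
    intro p hp
    rw [PySem.List.mem_enumerate_iff] at hp
    obtain ⟨kk, hkk, rfl⟩ := hp
    constructor
    · simp
    · simp only [zero_add]
      rw [← hpre]
      exact_mod_cast hkk
  have hlenA : ((PySem.List.enumerate hats 0).foldl (outerStep template)
      (hats.map (fun _ => (0 : Int)))).length = template.length := by
    rw [length_outer, List.length_map]; exact hpre
  have hlenB : ((PySem.List.enumerate hats 0).foldl (altStep template)
      (List.replicate template.length (0 : Int))).length = template.length :=
    length_alt template _ _ (by simp) hbnd
  apply List.ext_getElem
  · rw [hlenA, hlenB]
  · intro k h1 h2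
    have hk : k < template.length := by rw [hlenA] at h1; exact h1
    have hzeroA : (hats.map (fun _ => (0 : Int))).getD k 0 = 0 := by
      rw [List.getD_eq_getElem?_getD, List.getElem?_map]
      rcases Nat.lt_or_ge k hats.length with hlt | hge
      · rw [List.getElem?_eq_getElem hlt]; rfl
      · rw [List.getElem?_eq_none (by simpa using hge)]; rfl
    rw [← List.getD_eq_getElem _ 0 h1, ← List.getD_eq_getElem _ 0 h2,
      outer_getD template k hk _ _ (by rw [List.length_map]; exact hpre),
      alt_getD template k hk _ _ (by simp) hbnd, hzeroA]
    simp
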